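-- pv_equiv track=rewrite | github.com/lvargasgarcia/combinatorial_optimization | permutations.py | permutations_set
-- ===== SOURCE A (Python) =====
-- import itertools
--
-- def compose(p,q):
--     return [p[q[i]-1] for i in range(len(p))]
--
-- def inverse(p):
--     resp = [0 for _ in range(len(p))]
--     for i in range(len(p)):
--         resp[p[i]-1] = i + 1
--     return resp
--
-- def permutations_set(n, pos, k):
--     """
--     This functions returns the list of k!
--     permutations that help obtaining the list
--     of permutations that result from mixing the elements
--     of the pos-th set of k consecutive numbers in any
--     permutation pi of Sn
--     """
--     perms = {}
--     taus = list(itertools.permutations(range(1, k+1)))[1:]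
--
--     move_set_beginning = [i for i in range(pos, pos+k)] + [i for i in range(1,pos)] + [i for i in range(pos+k, n+1)]
--     move_set_end = inverse(move_set_beginning)
--
--     for tau in taus:
--         perms[tuple(compose(move_set_beginning, compose(list(tau) + [i for i in range(k+1,n+1)], move_set_end)))] = 0
--
--     return perms
-- ===== SOURCE B (Python) =====
-- import itertools
--
-- def permutations_set(n, pos, k):
--     """
--     Same result as A: for each non-identity tau in itertools order,
--     the permutation is the identity 1..n with the k-block starting at
--     position pos overwritten by the shifted tau -- no compose/inverse passes.
--     """
--     perms = {}
--     for tau in list(itertools.permutations(range(1, k + 1)))[1:]: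
--         base = list(range(1, n + 1))
--         for j in range(k):
--             base[pos - 1 + j] = pos - 1 + tau[j]
--         perms[tuple(base)] = 0
--     return perms
-- ===== Notes on version B (the rewrite author's own statement) =====
-- stated objective: simpler
-- what changed: Each output permutation is built by directly overwriting the k-slot block of a copied identity list (an O(k) edit) instead of composing three full-length permutations; the compose and inverse helpers are removed entirely.
-- outside the precondition, e.g. on permutations_set(-2, 1, 2): A returns {(2, 1): 0}, B raises IndexError; on permutations_set(4, 0, 2): A raises IndexError, B returns {(0, 2, 3, 1): 0}
import Mathlib
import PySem

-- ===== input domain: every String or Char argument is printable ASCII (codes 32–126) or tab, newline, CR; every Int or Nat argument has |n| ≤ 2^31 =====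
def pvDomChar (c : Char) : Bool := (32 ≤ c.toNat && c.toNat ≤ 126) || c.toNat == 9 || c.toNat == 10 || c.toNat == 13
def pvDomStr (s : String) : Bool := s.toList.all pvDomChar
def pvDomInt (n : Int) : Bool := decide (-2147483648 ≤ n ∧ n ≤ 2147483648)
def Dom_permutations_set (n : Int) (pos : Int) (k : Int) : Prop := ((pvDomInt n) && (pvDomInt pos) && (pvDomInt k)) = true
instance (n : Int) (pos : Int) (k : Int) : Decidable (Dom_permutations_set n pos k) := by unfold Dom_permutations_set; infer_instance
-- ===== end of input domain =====

-- B replaces A's three length-n compose/inverse passes per tau by a direct O(k)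
-- overwrite of the k-block of a copied identity list (objective: simpler).

-- ===== PORT A =====
def pvCompose (p q : List Int) : List Int :=
  (PySem.List.pyRange 0 (PySem.List.len p)).map
    (fun i => PySem.List.pyGetD p (PySem.List.pyGetD q i 0 - 1) 0)

def pvInverse (p : List Int) : List Int :=
  (PySem.List.pyRange 0 (PySem.List.len p)).foldl
    (fun resp i => PySem.List.pySetD resp (PySem.List.pyGetD p i 0 - 1) (i + 1))
    ((PySem.List.pyRange 0 (PySem.List.len p)).map (fun _ => (0 : Int)))

def permutations_set (n : Int) (pos : Int) (k : Int) : List (List Int × Int) :=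
  let perms : PySem.Dict (List Int) Int := PySem.Dict.empty
  let taus := PySem.List.slice
    (PySem.List.permutations (PySem.List.pyRange 1 (k+1)) (PySem.List.pyRange 1 (k+1)).length)
    (some 1) none
  let move_set_beginning :=
    PySem.List.pyRange pos (pos+k) ++ PySem.List.pyRange 1 pos ++ PySem.List.pyRange (pos+k) (n+1)
  let move_set_end := pvInverse move_set_beginning
  (taus.foldl (fun d tau =>
      d.insert (pvCompose move_set_beginning
        (pvCompose (tau ++ PySem.List.pyRange (k+1) (n+1)) move_set_end)) 0) perms).items

-- ===== PORT B =====
def permutations_set_alt (n : Int) (pos : Int) (k : Int) : List (List Int × Int) :=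
  let taus := PySem.List.slice
    (PySem.List.permutations (PySem.List.pyRange 1 (k+1)) (PySem.List.pyRange 1 (k+1)).length)
    (some 1) none
  (taus.foldl (fun d tau =>
      d.insert ((PySem.List.pyRange 0 k).foldl
          (fun base j => PySem.List.pySetD base (pos - 1 + j) (pos - 1 + PySem.List.pyGetD tau j 0))
          (PySem.List.pyRange 1 (n+1))) 0)
    (PySem.Dict.empty : PySem.Dict (List Int) Int)).items

-- ===== PRECONDITION & SPEC =====
-- pvL = len(move_set_beginning) for k ≤ 1, used to state when A's inverse loop stays in range
def pvL (n pos k : Int) : Int :=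
  (if k = 1 then 1 else 0) + max (pos - 1) 0 + max (n - pos - k + 1) 0
-- Pre_ admits the documented domain (the pos-th block of k consecutive numbers inside 1..n)
-- and, for k ≤ 1 (no taus, result {}), every input where A's index arithmetic stays in range;
-- it excludes inputs where A raises IndexError and the out-of-domain k ≥ 2 inputs on which A
-- returns tuples produced accidentally by Python's negative-index wraparound.
def Pre_permutations_set (n : Int) (pos : Int) (k : Int) : Prop :=
  (1 ≤ pos ∧ 0 ≤ n ∧ pos + k - 1 ≤ n) ∨
  (k ≤ 1 ∧
    (k = 1 → (1 - pvL n pos k ≤ pos ∧ pos ≤ pvL n pos k)) ∧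
    (2 ≤ pos → pos - 1 ≤ pvL n pos k) ∧
    (pos + k ≤ n → (1 - pvL n pos k ≤ pos + k ∧ n ≤ pvL n pos k)))
instance (n : Int) (pos : Int) (k : Int) : Decidable (Pre_permutations_set n pos k) := by
  unfold Pre_permutations_set; infer_instance
def pvWitness_permutations_set : Int × Int × Int := (4, 2, 2)

def Spec_permutations_set (n : Int) (pos : Int) (k : Int) (out : List (List Int × Int)) : Prop := out = permutations_set_alt n pos k
instance (n : Int) (pos : Int) (k : Int) (out : List (List Int × Int)) : Decidable (Spec_permutations_set n pos k out) := by unfold Spec_permutations_set; infer_instance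

-- ===== CLAIM (what is proved, stated in full; the proofs are below) =====
def Claim_equal_permutations_set : Prop := ∀ (n : Int) (pos : Int) (k : Int), Dom_permutations_set n pos k → Pre_permutations_set n pos k → Spec_permutations_set n pos k (permutations_set n pos k)

-- ===== LEMMAS AND PROOFS =====
def pvW (pos k j : Int) : Int :=
  if j < pos - 1 then k + j else if j < pos + k - 1 then j + 1 - pos else j
def pvMsb (n pos k : Int) : List Int :=
  PySem.List.pyRange pos (pos+k) ++ PySem.List.pyRange 1 pos ++ PySem.List.pyRange (pos+k) (n+1)
def pvInvPartial (n pos k t : Int) : List Int :=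
  (PySem.List.pyRange 0 t).foldl
    (fun resp i => PySem.List.pySetD resp (PySem.List.pyGetD (pvMsb n pos k) i 0 - 1) (i + 1))
    ((PySem.List.pyRange 0 (PySem.List.len (pvMsb n pos k))).map (fun _ => (0 : Int)))

theorem pv_getD_setD (P : List Int) (q j v : Int) (hq0 : 0 ≤ q)
    (hj0 : 0 ≤ j) (hj : j < (P.length : Int)) :
    PySem.List.pyGetD (PySem.List.pySetD P q v) j 0 = if j = q then v else PySem.List.pyGetD P j 0 := by
  rw [PySem.List.pySetD_of_nonneg _ _ hq0,
      PySem.List.pyGetD_eq_getElem _ _ hj0 (by simpa using hj),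
      PySem.List.pyGetD_eq_getElem _ _ hj0 hj,
      List.getElem_set]
  split_ifs <;> first | rfl | omega

theorem pv_msb_len (n pos k : Int) (h1 : 1 ≤ pos) (h3 : pos + k - 1 ≤ n) (hk : 0 ≤ k) :
    (pvMsb n pos k).length = n.toNat := by
  simp [pvMsb, PySem.List.length_pyRange_one]; omega

theorem pv_msb_get (n pos k : Int) (h1 : 1 ≤ pos) (h3 : pos + k - 1 ≤ n) (hk : 0 ≤ k)
    (i : Int) (hi0 : 0 ≤ i) (hi : i < n) :
    PySem.List.pyGetD (pvMsb n pos k) i 0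
      = if i < k then pos + i else if i < k + pos - 1 then i - k + 1 else i + 1 := by
  rw [PySem.List.pyGetD_eq_getElem _ _ hi0 (by rw [pv_msb_len n pos k h1 h3 hk]; omega)]
  simp [pvMsb, List.getElem_append, PySem.List.getElem_pyRange_one, PySem.List.length_pyRange_one]
  split_ifs <;> omega

theorem pv_inv_partial (n pos k : Int) (h1 : 1 ≤ pos) (h3 : pos + k - 1 ≤ n) (hk : 0 ≤ k) :
    ∀ (t : Nat), (t:Int) ≤ n →
    (pvInvPartial n pos k (t:Int)).length = n.toNat ∧
    ∀ j : Int, 0 ≤ j → j < n →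
      PySem.List.pyGetD (pvInvPartial n pos k (t:Int)) j 0
        = if pvW pos k j < (t:Int) then pvW pos k j + 1 else 0 := by
  intro t
  induction t with
  | zero =>
    intro ht
    have hnil : PySem.List.pyRange 0 ((0:Nat):Int) = [] := by
      apply PySem.List.pyRange_one_eq_nil; simp
    constructor
    · simp [pvInvPartial, PySem.List.len_eq, pv_msb_len n pos k h1 h3 hk,
        PySem.List.length_pyRange_one]
      omega
    · intro j hj0 hj
      have : pvInvPartial n pos k ((0:Nat):Int)
          = (PySem.List.pyRange 0 (PySem.List.len (pvMsb n pos k))).map (fun _ => (0 : Int)) := by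
        simp [pvInvPartial]
      rw [this]
      have hlen : PySem.List.len (pvMsb n pos k) = n := by
        rw [PySem.List.len_eq, pv_msb_len n pos k h1 h3 hk]; omega
      rw [hlen, PySem.List.pyGetD_map_pyRange_of_nonneg _ _ _ _ hj0 hj]
      have h0 : ¬ (pvW pos k j < ((0:Nat):Int)) := by
        simp only [pvW]; split_ifs <;> simp <;> omega
      rw [if_neg h0]
  | succ t ih =>
    intro ht
    have ht' : (t:Int) ≤ n := by push_cast at ht ⊢; omega
    obtain ⟨ihlen, ihget⟩ := ih ht'
    have hsplit : PySem.List.pyRange 0 (((t+1:Nat)):Int) = PySem.List.pyRange 0 (t:Int) ++ [(t:Int)] := by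
      push_cast
      exact PySem.List.pyRange_one_succ_right (by positivity)
    have hstep : pvInvPartial n pos k ((t+1:Nat):Int)
        = PySem.List.pySetD (pvInvPartial n pos k (t:Int))
            (PySem.List.pyGetD (pvMsb n pos k) (t:Int) 0 - 1) ((t:Int) + 1) := by
      rw [pvInvPartial, hsplit, List.foldl_append]; rfl
    have htn : (t:Int) < n := by push_cast at ht; omega
    have hmsb := pv_msb_get n pos k h1 h3 hk (t:Int) (by positivity) htn
    constructor
    · rw [hstep, PySem.List.length_pySetD, ihlen]
    · intro j hj0 hj
      rw [hstep, pv_getD_setD _ _ _ _ (by rw [hmsb]; split_ifs <;> omega)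
            hj0 (by rw [ihlen]; omega), ihget j hj0 hj, hmsb]
      simp only [pvW]
      split_ifs <;> omega

theorem pv_len_msb (n pos k : Int) (h1 : 1 ≤ pos) (h3 : pos + k - 1 ≤ n) (hk : 0 ≤ k) :
    PySem.List.len (pvMsb n pos k) = n := by
  rw [PySem.List.len_eq, pv_msb_len n pos k h1 h3 hk]; omega

theorem pv_inverse_eq (n pos k : Int) (h1 : 1 ≤ pos) (h3 : pos + k - 1 ≤ n) (hk : 0 ≤ k) :
    pvInverse (pvMsb n pos k) = pvInvPartial n pos k n := by
  rw [pvInverse, pvInvPartial, pv_len_msb n pos k h1 h3 hk]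

theorem pv_inv_get (n pos k : Int) (h1 : 1 ≤ pos) (h3 : pos + k - 1 ≤ n) (hk : 0 ≤ k)
    (j : Int) (hj0 : 0 ≤ j) (hj : j < n) :
    PySem.List.pyGetD (pvInverse (pvMsb n pos k)) j 0 = pvW pos k j + 1 := by
  rw [pv_inverse_eq n pos k h1 h3 hk]
  have hc : ((n.toNat : Nat) : Int) = n := by omega
  have h := (pv_inv_partial n pos k h1 h3 hk n.toNat (by omega)).2 j hj0 hj
  rw [hc] at h
  rw [h, if_pos]
  simp only [pvW]; split_ifs <;> omega

theorem pv_compose_len (p q : List Int) : (pvCompose p q).length = p.length := by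
  simp [pvCompose, PySem.List.length_pyRange_one, PySem.List.len_eq]

theorem pv_compose_get (p q : List Int) (i : Int) (hi0 : 0 ≤ i) (hi : i < (p.length : Int)) :
    PySem.List.pyGetD (pvCompose p q) i 0 = PySem.List.pyGetD p (PySem.List.pyGetD q i 0 - 1) 0 := by
  rw [pvCompose, PySem.List.len_eq, PySem.List.pyGetD_map_pyRange_of_nonneg _ _ _ _ hi0 hi]

def pvBPartial (n pos : Int) (tau : List Int) (t : Int) : List Int :=
  (PySem.List.pyRange 0 t).foldl
    (fun base j => PySem.List.pySetD base (pos - 1 + j) (pos - 1 + PySem.List.pyGetD tau j 0))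
    (PySem.List.pyRange 1 (n+1))

theorem pv_b_partial (n pos k : Int) (h1 : 1 ≤ pos) (h3 : pos + k - 1 ≤ n) (tau : List Int) :
    ∀ (t : Nat), (t:Int) ≤ k →
    (pvBPartial n pos tau (t:Int)).length = n.toNat ∧
    ∀ j : Int, 0 ≤ j → j < n →
      PySem.List.pyGetD (pvBPartial n pos tau (t:Int)) j 0
        = if pos - 1 ≤ j ∧ j < pos - 1 + (t:Int) then pos - 1 + PySem.List.pyGetD tau (j - (pos-1)) 0 else j + 1 := by
  intro t
  induction t with
  | zero =>
    intro ht
    have hnil : PySem.List.pyRange 0 ((0:Nat):Int) = [] := by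
      apply PySem.List.pyRange_one_eq_nil; simp
    have hbase : pvBPartial n pos tau ((0:Nat):Int) = PySem.List.pyRange 1 (n+1) := by
      simp [pvBPartial, hnil]
    refine ⟨by rw [hbase]; rw [PySem.List.length_pyRange_one]; omega, ?_⟩
    intro j hj0 hj
    have hno : ¬ (pos - 1 ≤ j ∧ j < pos - 1 + ((0:Nat):Int)) := by push_cast; omega
    rw [hbase, if_neg hno, PySem.List.pyGetD_eq_getElem _ _ hj0
        (by simp [PySem.List.length_pyRange_one]; omega),
      PySem.List.getElem_pyRange_one]
    omega
  | succ t ih =>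
    intro ht
    have ht' : (t:Int) ≤ k := by push_cast at ht; omega
    obtain ⟨ihlen, ihget⟩ := ih ht'
    have hsplit : PySem.List.pyRange 0 (((t+1:Nat)):Int) = PySem.List.pyRange 0 (t:Int) ++ [(t:Int)] := by
      push_cast
      exact PySem.List.pyRange_one_succ_right (by positivity)
    have hstep : pvBPartial n pos tau ((t+1:Nat):Int)
        = PySem.List.pySetD (pvBPartial n pos tau (t:Int))
            (pos - 1 + (t:Int)) (pos - 1 + PySem.List.pyGetD tau (t:Int) 0) := by
      rw [pvBPartial, hsplit, List.foldl_append]; rfl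
    refine ⟨by rw [hstep, PySem.List.length_pySetD, ihlen], ?_⟩
    intro j hj0 hj
    rw [hstep, pv_getD_setD _ _ _ _ (by omega) hj0 (by rw [ihlen]; omega), ihget j hj0 hj]
    by_cases hje : j = pos - 1 + (t:Int)
    · subst hje
      have hidx : pos - 1 + (t:Int) - (pos - 1) = (t:Int) := by ring
      rw [if_pos rfl, if_pos (by push_cast; omega), hidx]
    · rw [if_neg hje]
      split_ifs <;> first | rfl | omega

theorem pv_sig_get (n k : Int) (hk : 0 ≤ k) (hkn : k ≤ n) (tau : List Int) (hlen : tau.length = k.toNat)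
    (w : Int) (hw0 : 0 ≤ w) (hw : w < n) :
    PySem.List.pyGetD (tau ++ PySem.List.pyRange (k+1) (n+1)) w 0
      = if w < k then PySem.List.pyGetD tau w 0 else w + 1 := by
  have hslen : ((tau ++ PySem.List.pyRange (k+1) (n+1)).length : Int) = n := by
    simp [PySem.List.length_pyRange_one, hlen]; omega
  rw [PySem.List.pyGetD_eq_getElem _ _ hw0 (by omega)]
  rw [List.getElem_append]
  split
  · rw [if_pos (by omega), PySem.List.pyGetD_eq_getElem _ _ hw0 (by omega)]
  · rw [if_neg (by omega), PySem.List.getElem_pyRange_one]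
    omega

theorem pv_tau_bound (k : Int) (tau : List Int) (hlen : tau.length = k.toNat)
    (hmem : ∀ x ∈ tau, 1 ≤ x ∧ x ≤ k) (idx : Int) (hi0 : 0 ≤ idx) (hi : idx < (tau.length : Int)) :
    1 ≤ PySem.List.pyGetD tau idx 0 ∧ PySem.List.pyGetD tau idx 0 ≤ k := by
  rw [PySem.List.pyGetD_eq_getElem _ _ hi0 hi]
  exact hmem _ (List.getElem_mem _)

theorem pv_key (n pos k : Int) (h1 : 1 ≤ pos) (h3 : pos + k - 1 ≤ n) (hk : 0 ≤ k)
    (tau : List Int) (hlen : tau.length = k.toNat)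
    (hmem : ∀ x ∈ tau, 1 ≤ x ∧ x ≤ k) :
    pvCompose (pvMsb n pos k)
      (pvCompose (tau ++ PySem.List.pyRange (k+1) (n+1)) (pvInverse (pvMsb n pos k)))
      = pvBPartial n pos tau k := by
  have hkn : k ≤ n := by omega
  have hn0 : 0 ≤ n := by omega
  have hck : ((k.toNat : Nat) : Int) = k := by omega
  have hsig : (((tau ++ PySem.List.pyRange (k+1) (n+1)).length : Nat) : Int) = n := by
    simp [PySem.List.length_pyRange_one, hlen]; omega
  have hb := pv_b_partial n pos k h1 h3 tau k.toNat (by omega)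
  rw [hck] at hb
  obtain ⟨hblen, hbget⟩ := hb
  apply List.ext_getElem
  · rw [pv_compose_len, pv_msb_len n pos k h1 h3 hk, hblen]
  intro m hm1 hm2
  rw [pv_compose_len, pv_msb_len n pos k h1 h3 hk] at hm1
  have hmi0 : (0:Int) ≤ (m:Int) := by positivity
  have hmin : ((m:Int)) < n := by omega
  have hgl : ∀ (xs : List Int) (h : m < xs.length),
      xs[m]'h = PySem.List.pyGetD xs (m:Int) 0 := by
    intro xs h
    rw [PySem.List.pyGetD_eq_getElem _ _ hmi0 (by exact_mod_cast h)]
    simp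
  rw [hgl _ (by rw [pv_compose_len, pv_msb_len n pos k h1 h3 hk]; omega),
      hgl _ (by rw [hblen]; omega)]
  rw [pv_compose_get _ _ _ hmi0 (by rw [pv_msb_len n pos k h1 h3 hk]; omega)]
  rw [pv_compose_get _ _ _ hmi0 (by omega)]
  rw [pv_inv_get n pos k h1 h3 hk _ hmi0 hmin]
  have hw1 : pvW pos k (m:Int) + 1 - 1 = pvW pos k (m:Int) := by ring
  rw [hw1]
  have hw0 : 0 ≤ pvW pos k (m:Int) := by simp only [pvW]; split_ifs <;> omega
  have hwn : pvW pos k (m:Int) < n := by simp only [pvW]; split_ifs <;> omega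
  rw [pv_sig_get n k hk hkn tau hlen _ hw0 hwn]
  rw [hbget (m:Int) hmi0 hmin]
  by_cases hA : ((m:Int)) < pos - 1
  · have hw : pvW pos k (m:Int) = k + (m:Int) := by rw [pvW, if_pos hA]
    rw [hw, if_neg (by omega),
        pv_msb_get n pos k h1 h3 hk (k + (m:Int) + 1 - 1) (by omega) (by omega),
        if_neg (by omega), if_pos (by omega), if_neg (by omega)]
    omega
  · by_cases hB : ((m:Int)) < pos + k - 1
    · have hw : pvW pos k (m:Int) = (m:Int) + 1 - pos := by
        rw [pvW, if_neg hA, if_pos hB]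
      have hidx : ((m:Int)) + 1 - pos = (m:Int) - (pos - 1) := by ring
      have htb := pv_tau_bound k tau hlen hmem ((m:Int) + 1 - pos) (by omega)
        (by rw [hlen]; omega)
      rw [hw, if_pos (by omega),
          pv_msb_get n pos k h1 h3 hk _ (by omega) (by omega),
          if_pos (by omega), if_pos (by omega), hidx]
      omega
    · have hw : pvW pos k (m:Int) = (m:Int) := by rw [pvW, if_neg hA, if_neg hB]
      rw [hw, if_neg (by omega),
          pv_msb_get n pos k h1 h3 hk ((m:Int) + 1 - 1) (by omega) (by omega),
          if_neg (by omega), if_neg (by omega), if_neg (by omega)]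
      omega

-- ===== VERDICT (by name: the statement is the Claim_ definition above) =====
theorem permutations_set_spec : Claim_equal_permutations_set := by
  intro n pos k hdom hpre
  unfold Spec_permutations_set
  by_cases hk1 : k ≤ 1
  · show permutations_set n pos k = permutations_set_alt n pos k
    rcases lt_or_ge k 1 with hk0 | hk1'
    · have hr : PySem.List.pyRange 1 (k+1) = [] := PySem.List.pyRange_one_eq_nil (by omega)
      have hs : PySem.List.slice (PySem.List.permutations ([] : List Int) ([] : List Int).length)
          (some 1) none = [] := by decide
      simp only [permutations_set, permutations_set_alt, hr, hs, List.foldl_nil]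
    · have hke : k = 1 := by omega
      subst hke
      have hr : PySem.List.pyRange 1 (1+1) = [(1:Int)] := by decide
      have hs : PySem.List.slice (PySem.List.permutations [(1:Int)] [(1:Int)].length)
          (some 1) none = [] := by decide
      simp only [permutations_set, permutations_set_alt, hr, hs, List.foldl_nil]
  · have hk : 0 ≤ k := by omega
    obtain ⟨h1, h2, h3⟩ : 1 ≤ pos ∧ 0 ≤ n ∧ pos + k - 1 ≤ n := by
      rcases hpre with h | h
      · exact h
      · omega
    show permutations_set n pos k = permutations_set_alt n pos k
    simp only [permutations_set, permutations_set_alt]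
    congr 1
    apply PySem.List.foldl_congr_mem
    intro acc tau htau
    rw [PySem.List.slice_from _ (by norm_num : (0:Int) ≤ 1)] at htau
    have htau' : tau ∈ PySem.List.permutations (PySem.List.pyRange 1 (k+1))
        (PySem.List.pyRange 1 (k+1)).length := List.drop_subset _ _ htau
    have hperm := PySem.List.perm_of_mem_permutations htau'
    have hlen : tau.length = k.toNat := by
      rw [hperm.length_eq, PySem.List.length_pyRange_one]; omega
    have hmem : ∀ x ∈ tau, 1 ≤ x ∧ x ≤ k := by
      intro x hx
      have := hperm.mem_iff.mp hx
      rw [PySem.List.mem_pyRange_one] at this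
      omega
    exact congrArg (fun v => acc.insert v 0) (pv_key n pos k h1 h3 hk tau hlen hmem)
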